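-- pv_equiv track=rewrite | github.com/BlackFoundryCom/noto-source-reorganization | scripts/mti2fea.py | parseCursive
-- ===== SOURCE A (Python) =====
-- def parseLookupflag(chapeau):
--     lookupflag = ""
--     for j in chapeau:
--         if "yes" in j:
--             lookupflag += j[:-4] + " "
--         if "MarkAttachmentType" in j:
--             lookupflag += " @_MarkAttachmentType_".join(j.split("\t")) + " "
--         if "MarkFilterType" in j:
--             lookupflag += " @_FilterSet_".join(j.split("\t")).replace("MarkFilterType","UseMarkFilteringSet")
--     if len(lookupflag) != 0:
--         lookupflag = "    lookupflag " + lookupflag + " ;\n"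
--     return lookupflag
--
-- def parseCursive(name, lookup):
--     curs_txt = ""
--     curs_txt += "lookup " + name[2:-2] + " {\n"
--     entryDict = dict()
--     exitDict = dict()
--     rule = ""
--     if len(parseLookupflag(lookup[0:6])) != 0:
--         curs_txt += parseLookupflag(lookup[0:6])
--     for j in lookup[4:]:
--         j_list = j.split("\t")
--         if j_list[0] == "entry":
--             if len(j_list) == 4:
--                 entryDict[j_list[1]] = j_list[2] + " contourpoint " + j_list[3]
--             else:
--                 entryDict[j_list[1]] = j_list[2]
--         else:
--             exitDict[j_list[1]] = j_list[2]
--     for k in entryDict: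
--         entry = entryDict[k].replace(",", " ")
--         if k in exitDict:
--             exit = exitDict[k].replace(",", " ")
--         else:
--             exit = "NULL"
--         curs_txt +=  "\tposition cursive " + k + " <anchor "+ entry + ">" + " <anchor "+ exit + ">;\n"
--     for k in exitDict:
--         if k not in entryDict:
--             exit = exitDict[k].replace(",", " ")
--             curs_txt += "\tposition cursive " + k + " <anchor NULL>" + " <anchor "+ exit + ">;\n"
--     curs_txt += "    } " + name[2:-2] + " ;\n\n"
--     return str(curs_txt)
-- ===== SOURCE B (Python) =====
-- def parseLookupflag(chapeau):
--     parts = []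
--     for j in chapeau:
--         if "yes" in j:
--             parts.append(j[:-4] + " ")
--         if "MarkAttachmentType" in j:
--             parts.append(" @_MarkAttachmentType_".join(j.split("\t")) + " ")
--         if "MarkFilterType" in j:
--             parts.append(" @_FilterSet_".join(j.split("\t")).replace("MarkFilterType", "UseMarkFilteringSet"))
--     flag = "".join(parts)
--     return "    lookupflag " + flag + " ;\n" if flag else ""
--
-- def parseCursive(name, lookup):
--     core = name[2:-2]
--     body = lookup[4:]
--     pairs = {}
--     for rec in body:
--         f = rec.split("\t")
--         if f[0] == "entry":
--             pairs[f[1]] = (f[2] + " contourpoint " + f[3] if len(f) == 4 else f[2], "NULL")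
--     for rec in body:
--         f = rec.split("\t")
--         if f[0] != "entry":
--             if f[1] in pairs:
--                 pairs[f[1]] = (pairs[f[1]][0], f[2])
--             else:
--                 pairs[f[1]] = ("NULL", f[2])
--     lines = ["lookup " + core + " {\n", parseLookupflag(lookup[0:6])]
--     for k, (en, ex) in pairs.items():
--         lines.append("\tposition cursive " + k + " <anchor " + en.replace(",", " ")
--                      + "> <anchor " + ex.replace(",", " ") + ">;\n")
--     lines.append("    } " + core + " ;\n\n")
--     return "".join(lines)
-- ===== Notes on version B (the rewrite author's own statement) =====
-- stated objective: simpler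
-- what changed: B replaces A's two separate dicts and two emission loops by one combined glyph -> (entry, exit) dict (entry keys seeded first, exit slots filled second) emitted in a single loop, and builds the output by joining a list of parts instead of repeated string concatenation.
import Mathlib
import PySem

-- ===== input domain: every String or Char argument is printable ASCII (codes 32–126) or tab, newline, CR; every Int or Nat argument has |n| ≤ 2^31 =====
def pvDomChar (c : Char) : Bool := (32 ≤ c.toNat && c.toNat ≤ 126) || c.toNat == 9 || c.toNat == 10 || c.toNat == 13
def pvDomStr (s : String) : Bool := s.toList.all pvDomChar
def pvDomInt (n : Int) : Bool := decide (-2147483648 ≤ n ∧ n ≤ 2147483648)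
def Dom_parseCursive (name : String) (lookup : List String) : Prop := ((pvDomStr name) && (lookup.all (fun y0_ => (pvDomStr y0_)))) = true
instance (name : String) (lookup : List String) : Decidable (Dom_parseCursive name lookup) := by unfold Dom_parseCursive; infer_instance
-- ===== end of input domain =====

-- B replaces A's two dicts and two emission loops by one combined glyph → (entry, exit) dict
-- and a single emission loop, joining collected line parts (objective: simpler decomposition).

-- ===== PORT A =====
def parseLookupflagA (chapeau : List String) : String :=
  let lf := chapeau.foldl (fun lf j =>
    let lf := if PySem.Str.isIn "yes" j then
        lf ++ (PySem.Str.slice j none (some (-4)) ++ " ") else lf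
    let lf := if PySem.Str.isIn "MarkAttachmentType" j then
        lf ++ (PySem.Str.join " @_MarkAttachmentType_" ((PySem.Str.split? j "\t").getD []) ++ " ") else lf
    let lf := if PySem.Str.isIn "MarkFilterType" j then
        lf ++ PySem.Str.replace (PySem.Str.join " @_FilterSet_" ((PySem.Str.split? j "\t").getD [])) "MarkFilterType" "UseMarkFilteringSet" else lf
    lf) ""
  if PySem.Str.len lf ≠ 0 then "    lookupflag " ++ lf ++ " ;\n" else lf

def parseCursive (name : String) (lookup : List String) : String :=
  let curs_txt := "" ++ ("lookup " ++ PySem.Str.slice name (some 2) (some (-2)) ++ " {\n")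
  let flag := parseLookupflagA (PySem.List.slice lookup (some 0) (some 6))
  let curs_txt := if PySem.Str.len flag ≠ 0 then curs_txt ++ flag else curs_txt
  let st := (PySem.List.slice lookup (some 4) none).foldl
    (fun (st : PySem.Dict String String × PySem.Dict String String) j =>
      let jl := (PySem.Str.split? j "\t").getD []
      if (PySem.List.pyGet? jl 0).getD "" = "entry" then
        if jl.length = 4 then
          (st.1.insert ((PySem.List.pyGet? jl 1).getD "")
            (((PySem.List.pyGet? jl 2).getD "") ++ " contourpoint " ++ ((PySem.List.pyGet? jl 3).getD "")), st.2)
        else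
          (st.1.insert ((PySem.List.pyGet? jl 1).getD "") ((PySem.List.pyGet? jl 2).getD ""), st.2)
      else
        (st.1, st.2.insert ((PySem.List.pyGet? jl 1).getD "") ((PySem.List.pyGet? jl 2).getD "")))
    (PySem.Dict.empty, PySem.Dict.empty)
  let entryDict := st.1
  let exitDict := st.2
  let curs_txt := entryDict.keys.foldl (fun acc k =>
      let entry := PySem.Str.replace (entryDict.getD k "") "," " "
      let exit := if exitDict.contains k then PySem.Str.replace (exitDict.getD k "") "," " " else "NULL"
      acc ++ ("\tposition cursive " ++ k ++ " <anchor " ++ entry ++ ">" ++ " <anchor " ++ exit ++ ">;\n")) curs_txt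
  let curs_txt := exitDict.keys.foldl (fun acc k =>
      if !entryDict.contains k then
        acc ++ ("\tposition cursive " ++ k ++ " <anchor NULL>" ++ " <anchor " ++ PySem.Str.replace (exitDict.getD k "") "," " " ++ ">;\n")
      else acc) curs_txt
  curs_txt ++ ("    } " ++ PySem.Str.slice name (some 2) (some (-2)) ++ " ;\n\n")

-- ===== PORT B =====
def parseLookupflagB (chapeau : List String) : String :=
  let parts := chapeau.foldl (fun parts j =>
    let parts := if PySem.Str.isIn "yes" j then
        parts ++ [PySem.Str.slice j none (some (-4)) ++ " "] else parts
    let parts := if PySem.Str.isIn "MarkAttachmentType" j then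
        parts ++ [PySem.Str.join " @_MarkAttachmentType_" ((PySem.Str.split? j "\t").getD []) ++ " "] else parts
    let parts := if PySem.Str.isIn "MarkFilterType" j then
        parts ++ [PySem.Str.replace (PySem.Str.join " @_FilterSet_" ((PySem.Str.split? j "\t").getD [])) "MarkFilterType" "UseMarkFilteringSet"] else parts
    parts) ([] : List String)
  let flag := PySem.Str.join "" parts
  if flag ≠ "" then "    lookupflag " ++ flag ++ " ;\n" else ""

def parseCursive_alt (name : String) (lookup : List String) : String :=
  let core := PySem.Str.slice name (some 2) (some (-2))
  let body := PySem.List.slice lookup (some 4) none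
  let pairs := body.foldl (fun (pairs : PySem.Dict String (String × String)) rec =>
      let f := (PySem.Str.split? rec "\t").getD []
      if (PySem.List.pyGet? f 0).getD "" = "entry" then
        pairs.insert ((PySem.List.pyGet? f 1).getD "")
          ((if f.length = 4 then
              ((PySem.List.pyGet? f 2).getD "") ++ " contourpoint " ++ ((PySem.List.pyGet? f 3).getD "")
            else (PySem.List.pyGet? f 2).getD ""), "NULL")
      else pairs) PySem.Dict.empty
  let pairs := body.foldl (fun (pairs : PySem.Dict String (String × String)) rec =>
      let f := (PySem.Str.split? rec "\t").getD []
      if (PySem.List.pyGet? f 0).getD "" ≠ "entry" then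
        let k := (PySem.List.pyGet? f 1).getD ""
        match pairs.get? k with
        | some pr => pairs.insert k (pr.1, (PySem.List.pyGet? f 2).getD "")
        | none => pairs.insert k ("NULL", (PySem.List.pyGet? f 2).getD "")
      else pairs) pairs
  let lines := ["lookup " ++ core ++ " {\n", parseLookupflagB (PySem.List.slice lookup (some 0) (some 6))]
  let lines := pairs.items.foldl (fun lines kv =>
      lines ++ ["\tposition cursive " ++ kv.1 ++ " <anchor " ++ PySem.Str.replace kv.2.1 "," " "
        ++ "> <anchor " ++ PySem.Str.replace kv.2.2 "," " " ++ ">;\n"]) lines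
  let lines := lines ++ ["    } " ++ core ++ " ;\n\n"]
  PySem.Str.join "" lines

-- ===== PRECONDITION & SPEC =====
-- Pre_ excludes exactly the inputs on which A raises IndexError: a record after the 4-line
-- header that splits into fewer than 3 tab-separated fields (B raises there too).
def Pre_parseCursive (name : String) (lookup : List String) : Prop :=
  ∀ j ∈ lookup.drop 4, 3 ≤ ((PySem.Str.split? j "\t").getD []).length
instance (name : String) (lookup : List String) : Decidable (Pre_parseCursive name lookup) := by
  unfold Pre_parseCursive; infer_instance

def pvWitness_parseCursive : String × List String :=
  ("LUcursLU", ["cursive", "yes\tx", "a", "b", "entry\talef\t100,20", "exit\talef\t10,3", "exit\tbeh\t5,5"])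

def Spec_parseCursive (name : String) (lookup : List String) (out : String) : Prop := out = parseCursive_alt name lookup
instance (name : String) (lookup : List String) (out : String) : Decidable (Spec_parseCursive name lookup out) := by unfold Spec_parseCursive; infer_instance

-- ===== CLAIM (what is proved, stated in full; the proofs are below) =====
def Claim_equal_parseCursive : Prop := ∀ (name : String) (lookup : List String), Dom_parseCursive name lookup → Pre_parseCursive name lookup → Spec_parseCursive name lookup (parseCursive name lookup)

-- ===== LEMMAS AND PROOFS =====

-- record field helpers shared by the proof layer
def pvFields (j : String) : List String := (PySem.Str.split? j "\t").getD []
def pvKey (j : String) : String := (PySem.List.pyGet? (pvFields j) 1).getD ""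
def pvExitV (j : String) : String := (PySem.List.pyGet? (pvFields j) 2).getD ""
def pvEntryV (j : String) : String :=
  if (pvFields j).length = 4 then
    pvExitV j ++ " contourpoint " ++ ((PySem.List.pyGet? (pvFields j) 3).getD "")
  else pvExitV j

-- the two single-dict folds A's paired fold splits into
def pvStepE (d : PySem.Dict String String) (j : String) : PySem.Dict String String :=
  if (PySem.List.pyGet? (pvFields j) 0).getD "" = "entry" then d.insert (pvKey j) (pvEntryV j) else d
def pvStepX (d : PySem.Dict String String) (j : String) : PySem.Dict String String :=
  if (PySem.List.pyGet? (pvFields j) 0).getD "" = "entry" then d else d.insert (pvKey j) (pvExitV j)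
-- B's two passes
def pvStep1 (d : PySem.Dict String (String × String)) (j : String) : PySem.Dict String (String × String) :=
  if (PySem.List.pyGet? (pvFields j) 0).getD "" = "entry" then d.insert (pvKey j) (pvEntryV j, "NULL") else d
def pvStep2 (d : PySem.Dict String (String × String)) (j : String) : PySem.Dict String (String × String) :=
  if (PySem.List.pyGet? (pvFields j) 0).getD "" ≠ "entry" then
    match d.get? (pvKey j) with
    | some pr => d.insert (pvKey j) (pr.1, pvExitV j)
    | none => d.insert (pvKey j) ("NULL", pvExitV j)
  else d

def pvStrcat (l : List String) : String := l.foldl (· ++ ·) ""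

def pvLineA (X : PySem.Dict String String) (p : String × String) : String :=
  "\tposition cursive " ++ p.1 ++ " <anchor " ++ PySem.Str.replace p.2 "," " " ++ ">" ++ " <anchor " ++
    (if X.contains p.1 then PySem.Str.replace (X.getD p.1 "") "," " " else "NULL") ++ ">;\n"
def pvLineX (p : String × String) : String :=
  "\tposition cursive " ++ p.1 ++ " <anchor NULL>" ++ " <anchor " ++ PySem.Str.replace p.2 "," " " ++ ">;\n"
def pvLineB (p : String × (String × String)) : String :=
  "\tposition cursive " ++ p.1 ++ " <anchor " ++ PySem.Str.replace p.2.1 "," " "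
    ++ "> <anchor " ++ PySem.Str.replace p.2.2 "," " " ++ ">;\n"

-- the combined dict's items, expressed from A's two dicts
def X_filter (X E : PySem.Dict String String) : List (String × String) :=
  X.items.filter (fun p => !E.contains p.1)
def pvF (E X : PySem.Dict String String) : List (String × (String × String)) :=
  E.items.map (fun p => (p.1, (p.2, X.getD p.1 "NULL")))
    ++ (X_filter X E).map (fun p => (p.1, ("NULL", p.2)))

-- string/fold plumbing
lemma pv_foldl_acc (l : List String) (s : String) : l.foldl (· ++ ·) s = s ++ pvStrcat l := by
  induction l generalizing s with
  | nil => simp [pvStrcat]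
  | cons x xs ih =>
      simp only [pvStrcat, List.foldl_cons]
      rw [ih (s ++ x), ih ("" ++ x)]
      simp [String.append_assoc]
lemma pv_strcat_cons (x : String) (l : List String) : pvStrcat (x :: l) = x ++ pvStrcat l := by
  simp only [pvStrcat, List.foldl_cons]
  rw [pv_foldl_acc]
  simp [pvStrcat]
lemma pv_strcat_append (l1 l2 : List String) : pvStrcat (l1 ++ l2) = pvStrcat l1 ++ pvStrcat l2 := by
  induction l1 with
  | nil => simp [pvStrcat]
  | cons x xs ih => simp [pv_strcat_cons, ih, String.append_assoc]
lemma pv_join_empty (l : List String) : PySem.Str.join "" l = pvStrcat l := by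
  induction l with
  | nil => rfl
  | cons x xs ih =>
      rw [pv_strcat_cons, ← ih]
      cases xs with
      | nil =>
          apply String.toList_inj.mp
          simp [PySem.Str.toList_join, PySem.Chars.join_singleton, PySem.Chars.join_nil]
      | cons y ys =>
          apply String.toList_inj.mp
          simp [PySem.Str.toList_join, PySem.Chars.join_cons_cons]
lemma pv_foldl_emit {α : Type} (g : α → String) (l : List α) (acc : String) :
    l.foldl (fun a x => a ++ g x) acc = acc ++ pvStrcat (l.map g) := by
  induction l generalizing acc with
  | nil => simp [pvStrcat]
  | cons x xs ih => simp [ih, pv_strcat_cons, String.append_assoc]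
lemma pv_foldl_emit_if {α : Type} (c : α → Bool) (g : α → String) (l : List α) (acc : String) :
    l.foldl (fun a x => if c x then a ++ g x else a) acc = acc ++ pvStrcat ((l.filter c).map g) := by
  induction l generalizing acc with
  | nil => simp [pvStrcat]
  | cons x xs ih =>
      by_cases h : c x
      · simp [h, ih, pv_strcat_cons, String.append_assoc]
      · simp [h, ih]
lemma pv_foldl_lines {α : Type} (g : α → String) (l : List α) (init : List String) :
    l.foldl (fun ls x => ls ++ [g x]) init = init ++ l.map g := by
  induction l generalizing init with
  | nil => simp
  | cons x xs ih => simp [ih]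

lemma pv_condflag (c f : String) : (if PySem.Str.len f ≠ 0 then c ++ f else c) = c ++ f := by
  by_cases hf : f = ""
  · subst hf; simp [PySem.Str.len_eq]
  · rw [if_pos]
    simp only [PySem.Str.len_eq, ne_eq, Nat.cast_eq_zero, List.length_eq_zero_iff]
    intro hnil
    exact hf (String.toList_inj.mp (by simp [hnil]))

-- the two lookupflag renderings agree
lemma pv_flag_eq (ch : List String) : parseLookupflagB ch = parseLookupflagA ch := by
  have key : ∀ (cs : List String) (l : List String) (s : String), s = pvStrcat l →
      cs.foldl (fun lf j =>
        let lf := if PySem.Str.isIn "yes" j then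
            lf ++ (PySem.Str.slice j none (some (-4)) ++ " ") else lf
        let lf := if PySem.Str.isIn "MarkAttachmentType" j then
            lf ++ (PySem.Str.join " @_MarkAttachmentType_" ((PySem.Str.split? j "\t").getD []) ++ " ") else lf
        let lf := if PySem.Str.isIn "MarkFilterType" j then
            lf ++ PySem.Str.replace (PySem.Str.join " @_FilterSet_" ((PySem.Str.split? j "\t").getD [])) "MarkFilterType" "UseMarkFilteringSet" else lf
        lf) s
      = pvStrcat (cs.foldl (fun parts j =>
        let parts := if PySem.Str.isIn "yes" j then
            parts ++ [PySem.Str.slice j none (some (-4)) ++ " "] else parts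
        let parts := if PySem.Str.isIn "MarkAttachmentType" j then
            parts ++ [PySem.Str.join " @_MarkAttachmentType_" ((PySem.Str.split? j "\t").getD []) ++ " "] else parts
        let parts := if PySem.Str.isIn "MarkFilterType" j then
            parts ++ [PySem.Str.replace (PySem.Str.join " @_FilterSet_" ((PySem.Str.split? j "\t").getD [])) "MarkFilterType" "UseMarkFilteringSet"] else parts
        parts) l) := by
    intro cs
    induction cs with
    | nil => intro l s h; simpa using h
    | cons j js ih =>
        intro l s h
        simp only [List.foldl_cons]
        apply ih
        subst h
        split_ifs <;> simp [pvStrcat, String.append_assoc]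
  have cond_eq : ∀ s : String,
      (if s ≠ "" then "    lookupflag " ++ s ++ " ;\n" else "")
        = (if PySem.Str.len s ≠ 0 then "    lookupflag " ++ s ++ " ;\n" else s) := by
    intro s
    by_cases hs : s = ""
    · rw [hs]; simp [PySem.Str.len_eq]
    · rw [if_pos hs, if_pos]
      simp only [PySem.Str.len_eq, ne_eq, Nat.cast_eq_zero, List.length_eq_zero_iff]
      intro hnil
      exact hs (String.toList_inj.mp (by simp [hnil]))
  simp only [parseLookupflagA, parseLookupflagB]
  rw [pv_join_empty, ← key ch [] "" (by simp [pvStrcat])]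
  exact cond_eq _

-- A's paired fold is the pair of the single folds
lemma pv_pair_fold (l : List String) (d1 d2 : PySem.Dict String String) :
    l.foldl (fun st j => (pvStepE st.1 j, pvStepX st.2 j)) (d1, d2)
      = (l.foldl pvStepE d1, l.foldl pvStepX d2) := by
  induction l generalizing d1 d2 with
  | nil => rfl
  | cons j js ih => simp only [List.foldl_cons]; exact ih _ _

lemma pv_nodup_foldE (l : List String) (d : PySem.Dict String String) (h : d.keys.Nodup) :
    (l.foldl pvStepE d).keys.Nodup := by
  induction l generalizing d with
  | nil => exact h
  | cons j js ih =>
      simp only [List.foldl_cons, pvStepE]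
      split_ifs
      · exact ih _ (PySem.Dict.nodup_keys_insert _ _ _ h)
      · exact ih _ h
lemma pv_nodup_foldX (l : List String) (d : PySem.Dict String String) (h : d.keys.Nodup) :
    (l.foldl pvStepX d).keys.Nodup := by
  induction l generalizing d with
  | nil => exact h
  | cons j js ih =>
      simp only [List.foldl_cons, pvStepX]
      split_ifs
      · exact ih _ h
      · exact ih _ (PySem.Dict.nodup_keys_insert _ _ _ h)

-- keys transfer between a dict and its value-mapped image
lemma pv_keys_of_items_map (d : PySem.Dict String (String × String)) (e : PySem.Dict String String)
    (h : d.items = e.items.map (fun p => (p.1, (p.2, "NULL")))) : d.keys = e.keys := by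
  show d.items.map Prod.fst = e.items.map Prod.fst
  rw [h, List.map_map]
  rfl
lemma pv_contains_of_items_map (d : PySem.Dict String (String × String)) (e : PySem.Dict String String)
    (h : d.items = e.items.map (fun p => (p.1, (p.2, "NULL")))) (k : String) :
    d.contains k = e.contains k := by
  by_cases hk : k ∈ e.keys
  · rw [(PySem.Dict.contains_iff_mem_keys _ _).mpr hk,
      (PySem.Dict.contains_iff_mem_keys _ _).mpr (by rwa [pv_keys_of_items_map d e h])]
  · have h1 : d.contains k ≠ true := by
      simp only [ne_eq, PySem.Dict.contains_iff_mem_keys, pv_keys_of_items_map d e h]; exact hk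
    have h2 : e.contains k ≠ true := by
      simp only [ne_eq, PySem.Dict.contains_iff_mem_keys]; exact hk
    simp only [Bool.not_eq_true] at h1 h2
    rw [h1, h2]

-- pass 1 of B mirrors A's entry dict with "NULL" exits
lemma pv_pass1 (l : List String) (d : PySem.Dict String (String × String)) (e : PySem.Dict String String)
    (h : d.items = e.items.map (fun p => (p.1, (p.2, "NULL")))) :
    (l.foldl pvStep1 d).items = (l.foldl pvStepE e).items.map (fun p => (p.1, (p.2, "NULL"))) := by
  induction l generalizing d e with
  | nil => exact h
  | cons j js ih =>
      simp only [List.foldl_cons, pvStep1, pvStepE]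
      split_ifs
      · apply ih
        by_cases hc : e.contains (pvKey j)
        · rw [PySem.Dict.items_insert_of_contains _ _ hc,
            PySem.Dict.items_insert_of_contains _ _ (by rw [pv_contains_of_items_map d e h]; exact hc),
            h, List.map_map, List.map_map]
          apply List.map_congr_left
          intro p _
          by_cases hp : p.1 = pvKey j <;> simp [hp]
        · rw [PySem.Dict.items_insert_of_not_contains _ _
              (by rw [pv_contains_of_items_map d e h]; simpa using hc),
            PySem.Dict.items_insert_of_not_contains _ _ (by simpa using hc),
            h, List.map_append]
          simp
      · exact ih _ _ h

-- keys of the combined shape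
lemma pv_keysF (E X : PySem.Dict String String) :
    (pvF E X).map Prod.fst = E.keys ++ (X.items.filter (fun p => !E.contains p.1)).map Prod.fst := by
  simp only [pvF, List.map_append, List.map_map]
  rfl
lemma pv_nodupF (E X : PySem.Dict String String) (hE : E.keys.Nodup) (hX : X.keys.Nodup) :
    ((pvF E X).map Prod.fst).Nodup := by
  rw [pv_keysF]
  apply List.Nodup.append hE
  · have : ((X.items.filter (fun p => !E.contains p.1)).map Prod.fst).Sublist
        (X.items.map Prod.fst) := List.Sublist.map _ List.filter_sublist
    exact this.nodup hX
  · intro k hk hk2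
    obtain ⟨p, hp, rfl⟩ := List.mem_map.mp hk2
    have := List.of_mem_filter hp
    rw [(PySem.Dict.contains_iff_mem_keys E p.1).mpr hk] at this
    simp at this

lemma pv_pairs_nodup (E x : PySem.Dict String String) (hE : E.keys.Nodup) (hx : x.keys.Nodup)
    (pairs : PySem.Dict String (String × String)) (h : pairs.items = pvF E x) :
    pairs.keys.Nodup := by
  show (pairs.items.map Prod.fst).Nodup
  rw [h]
  exact pv_nodupF E x hE hx

lemma pv_val_eq (E : PySem.Dict String String) (hE : E.keys.Nodup) {k a b : String}
    (ha : (k, a) ∈ E.items) (hb : (k, b) ∈ E.items) : a = b := by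
  have h1 := PySem.Dict.get?_of_mem_items E ha hE
  have h2 := PySem.Dict.get?_of_mem_items E hb hE
  rw [h1] at h2
  exact Option.some_inj.mp h2

-- one non-entry record, stepped through both representations
lemma pv_pass2_step (E : PySem.Dict String String) (hE : E.keys.Nodup)
    (x : PySem.Dict String String) (hx : x.keys.Nodup)
    (pairs : PySem.Dict String (String × String)) (h : pairs.items = pvF E x)
    (k v : String) :
    (match pairs.get? k with
      | some pr => pairs.insert k (pr.1, v)
      | none => pairs.insert k ("NULL", v)).items = pvF E (x.insert k v) := by
  have hpk : pairs.keys = (pvF E x).map Prod.fst := by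
    show pairs.items.map Prod.fst = _
    rw [h]
  have hnd := pv_pairs_nodup E x hE hx pairs h
  by_cases hEc : E.contains k = true
  · -- k is an entry glyph
    obtain ⟨p, hpmem, hpk1⟩ := List.mem_map.mp ((PySem.Dict.contains_iff_mem_keys E k).mp hEc)
    have hmem : (k, (p.2, x.getD k "NULL")) ∈ pairs.items := by
      rw [h, pvF]
      apply List.mem_append_left
      apply List.mem_map.mpr
      exact ⟨p, hpmem, by rw [hpk1]⟩
    have hget : pairs.get? k = some (p.2, x.getD k "NULL") :=
      PySem.Dict.get?_of_mem_items pairs hmem hnd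
    rw [hget]
    have hcont : pairs.contains k = true :=
      (PySem.Dict.contains_iff_mem_keys pairs k).mpr (List.mem_map.mpr ⟨_, hmem, rfl⟩)
    rw [PySem.Dict.items_insert_of_contains _ _ hcont, h, pvF, pvF, List.map_append,
      List.map_map, List.map_map]
    congr 1
    · apply List.map_congr_left
      intro q hq
      by_cases hq1 : q.1 = k
      · have hq' : (k, q.2) ∈ E.items := by rw [← hq1]; exact hq
        have hp' : (k, p.2) ∈ E.items := by rw [← hpk1]; exact hpmem
        have : q.2 = p.2 := pv_val_eq E hE hq' hp'
        simp [Function.comp, hq1, this, PySem.Dict.getD_insert_self]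
      · simp [Function.comp, hq1, PySem.Dict.getD_insert_of_ne _ _ _ hq1]
    · have hfilt : ∀ q ∈ X_filter x E, (q.1 == k) = false := by
        intro q hq
        have := List.of_mem_filter hq
        apply beq_eq_false_iff_ne.mpr
        intro hqe
        rw [hqe, hEc] at this
        simp at this
      have lhs_eq : ∀ q ∈ X_filter x E,
          ((fun q' => if (q'.1 == k) = true then (k, (p.2, x.getD k "NULL").1, v) else q') ∘
            (fun p' : String × String => (p'.1, "NULL", p'.2))) q = (q.1, "NULL", q.2) := by
        intro q hq
        simp [Function.comp, hfilt q hq]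
      rw [List.map_congr_left lhs_eq]
      simp only [X_filter]
      by_cases hxc : x.contains k = true
      · rw [PySem.Dict.items_insert_of_contains _ _ hxc, List.filter_map, List.map_map]
        have hfe : List.filter ((fun p => !E.contains p.1) ∘
            (fun p : String × String => if (p.1 == k) = true then (k, v) else p)) x.items
            = List.filter (fun p => !E.contains p.1) x.items := by
          apply List.filter_congr
          intro q hq
          by_cases hq1 : (q.1 == k) = true
          · have hqe : q.1 = k := by simpa using hq1
            simp only [Function.comp, hq1, if_pos]
            rw [hqe]
          · simp [Function.comp, hq1]
        rw [hfe]
        symm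
        apply List.map_congr_left
        intro q hq
        simp [Function.comp, hfilt q hq]
      · rw [PySem.Dict.items_insert_of_not_contains _ _ (by simpa using hxc)]
        rw [List.filter_append]
        have : List.filter (fun p => !E.contains p.1) [(k, v)] = [] := by
          simp [hEc]
        rw [this, List.append_nil]
  · -- k is not an entry glyph
    have hq1ne : ∀ q : String × String, q.1 ∈ E.keys → (q.1 == k) = false := by
      intro q hq
      apply beq_eq_false_iff_ne.mpr
      intro hqe
      rw [← hqe] at hEc
      exact hEc ((PySem.Dict.contains_iff_mem_keys E q.1).mpr hq)
    by_cases hxc : x.contains k = true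
    · -- exit-only glyph already seen
      obtain ⟨q0, hq0mem, hq0k⟩ := List.mem_map.mp ((PySem.Dict.contains_iff_mem_keys x k).mp hxc)
      have hq0filt : q0 ∈ X_filter x E := by
        apply List.mem_filter.mpr
        refine ⟨hq0mem, ?_⟩
        rw [hq0k]
        simp [hEc]
      have hmem : (k, ("NULL", q0.2)) ∈ pairs.items := by
        rw [h, pvF]
        apply List.mem_append_right
        apply List.mem_map.mpr
        exact ⟨q0, hq0filt, by rw [hq0k]⟩
      have hget : pairs.get? k = some ("NULL", q0.2) :=
        PySem.Dict.get?_of_mem_items pairs hmem hnd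
      rw [hget]
      have hcont : pairs.contains k = true :=
        (PySem.Dict.contains_iff_mem_keys pairs k).mpr (List.mem_map.mpr ⟨_, hmem, rfl⟩)
      rw [PySem.Dict.items_insert_of_contains _ _ hcont, h, pvF, pvF, List.map_append,
        List.map_map, List.map_map]
      congr 1
      · apply List.map_congr_left
        intro q hq
        have hqk : (q.1 == k) = false := hq1ne q (List.mem_map.mpr ⟨q, hq, rfl⟩)
        have : q.1 ≠ k := by simpa using hqk
        simp [Function.comp, hqk, PySem.Dict.getD_insert_of_ne _ _ _ this]
      · simp only [X_filter]
        rw [PySem.Dict.items_insert_of_contains _ _ hxc, List.filter_map, List.map_map]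
        have hfe : List.filter ((fun p => !E.contains p.1) ∘
            (fun p : String × String => if (p.1 == k) = true then (k, v) else p)) x.items
            = List.filter (fun p => !E.contains p.1) x.items := by
          apply List.filter_congr
          intro q hq
          by_cases hq1 : (q.1 == k) = true
          · have hqe : q.1 = k := by simpa using hq1
            simp only [Function.comp, hq1, if_pos]
            rw [hqe]
          · simp [Function.comp, hq1]
        rw [hfe]
        apply List.map_congr_left
        intro q hq
        by_cases hq1 : (q.1 == k) = true
        · have hqe : q.1 = k := by simpa using hq1
          simp [Function.comp, hq1]
        · simp [Function.comp, hq1]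
    · -- entirely new glyph
      have hknotin : k ∉ pairs.keys := by
        rw [hpk, pv_keysF]
        intro hmem
        rcases List.mem_append.mp hmem with h1 | h1
        · exact hEc ((PySem.Dict.contains_iff_mem_keys E k).mpr h1)
        · obtain ⟨q, hq, hqk⟩ := List.mem_map.mp h1
          have hq' : q ∈ x.items := List.mem_of_mem_filter hq
          have hk' : k ∈ x.keys := List.mem_map.mpr ⟨q, hq', hqk⟩
          exact hxc ((PySem.Dict.contains_iff_mem_keys x k).mpr hk')
      have hget : pairs.get? k = none :=
        (PySem.Dict.get?_eq_none_iff_not_mem_keys pairs k).mpr hknotin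
      rw [hget]
      have hcont : pairs.contains k = false := by
        have : pairs.contains k ≠ true := by
          simp only [ne_eq, PySem.Dict.contains_iff_mem_keys]; exact hknotin
        simpa using this
      rw [PySem.Dict.items_insert_of_not_contains _ _ hcont, h, pvF, pvF]
      simp only [X_filter]
      rw [PySem.Dict.items_insert_of_not_contains _ _ (by simpa using hxc)]
      rw [List.filter_append]
      have : List.filter (fun p => !E.contains p.1) [(k, v)] = [(k, v)] := by
        simp [hEc]
      rw [this, List.map_append, List.append_assoc]
      congr 1
      · apply List.map_congr_left
        intro q hq
        have : q.1 ≠ k := by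
          simpa using hq1ne q (List.mem_map.mpr ⟨q, hq, rfl⟩)
        simp [PySem.Dict.getD_insert_of_ne _ _ _ this]

-- pass 2 of B: the invariant
lemma pv_pass2 (E : PySem.Dict String String) (hE : E.keys.Nodup) (l : List String)
    (x : PySem.Dict String String) (hx : x.keys.Nodup)
    (pairs : PySem.Dict String (String × String)) (h : pairs.items = pvF E x) :
    (l.foldl pvStep2 pairs).items = pvF E (l.foldl pvStepX x) := by
  induction l generalizing x pairs with
  | nil => exact h
  | cons j js ih =>
      simp only [List.foldl_cons, pvStep2, pvStepX]
      by_cases he : (PySem.List.pyGet? (pvFields j) 0).getD "" = "entry"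
      · simp only [he, if_pos, ne_eq, not_true_eq_false, if_false]
        exact ih x hx pairs h
      · simp only [he, if_neg, ne_eq, not_false_eq_true, if_true]
        exact ih (x.insert (pvKey j) (pvExitV j))
          (PySem.Dict.nodup_keys_insert _ _ _ hx) _
          (pv_pass2_step E hE x hx pairs h (pvKey j) (pvExitV j))

-- characterizations of the two ports
lemma pv_A_char (name : String) (lookup : List String) :
    parseCursive name lookup =
      ("lookup " ++ PySem.Str.slice name (some 2) (some (-2)) ++ " {\n")
        ++ parseLookupflagA (PySem.List.slice lookup (some 0) (some 6))
        ++ pvStrcat (((PySem.List.slice lookup (some 4) none).foldl pvStepE PySem.Dict.empty).items.map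
              (pvLineA ((PySem.List.slice lookup (some 4) none).foldl pvStepX PySem.Dict.empty)))
        ++ pvStrcat ((((PySem.List.slice lookup (some 4) none).foldl pvStepX PySem.Dict.empty).items.filter
              (fun p => !((PySem.List.slice lookup (some 4) none).foldl pvStepE PySem.Dict.empty).contains p.1)).map pvLineX)
        ++ ("    } " ++ PySem.Str.slice name (some 2) (some (-2)) ++ " ;\n\n") := by
  have hf : (fun (st : PySem.Dict String String × PySem.Dict String String) j =>
      if (PySem.List.pyGet? ((PySem.Str.split? j "\t").getD []) 0).getD "" = "entry" then
        if ((PySem.Str.split? j "\t").getD []).length = 4 then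
          (st.1.insert ((PySem.List.pyGet? ((PySem.Str.split? j "\t").getD []) 1).getD "")
            ((PySem.List.pyGet? ((PySem.Str.split? j "\t").getD []) 2).getD "" ++ " contourpoint " ++
              (PySem.List.pyGet? ((PySem.Str.split? j "\t").getD []) 3).getD ""), st.2)
        else
          (st.1.insert ((PySem.List.pyGet? ((PySem.Str.split? j "\t").getD []) 1).getD "")
            ((PySem.List.pyGet? ((PySem.Str.split? j "\t").getD []) 2).getD ""), st.2)
      else
        (st.1, st.2.insert ((PySem.List.pyGet? ((PySem.Str.split? j "\t").getD []) 1).getD "")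
          ((PySem.List.pyGet? ((PySem.Str.split? j "\t").getD []) 2).getD "")))
      = (fun (st : PySem.Dict String String × PySem.Dict String String) j =>
          (pvStepE st.1 j, pvStepX st.2 j)) := by
    funext st j
    simp only [pvStepE, pvStepX, pvFields, pvKey, pvEntryV, pvExitV]
    split_ifs <;> rfl
  simp only [parseCursive]
  rw [hf, pv_pair_fold]
  dsimp only
  rw [pv_foldl_emit_if, pv_foldl_emit, pv_condflag,
    PySem.Dict.items_eq_map_keys _ (pv_nodup_foldE (PySem.List.slice lookup (some 4) none) _ PySem.Dict.nodup_keys_empty) "",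
    PySem.Dict.items_eq_map_keys _ (pv_nodup_foldX (PySem.List.slice lookup (some 4) none) _ PySem.Dict.nodup_keys_empty) ""]
  simp only [List.filter_map, List.map_map]
  rfl

lemma pv_B_char (name : String) (lookup : List String) :
    parseCursive_alt name lookup =
      ("lookup " ++ PySem.Str.slice name (some 2) (some (-2)) ++ " {\n")
        ++ parseLookupflagA (PySem.List.slice lookup (some 0) (some 6))
        ++ pvStrcat ((pvF ((PySem.List.slice lookup (some 4) none).foldl pvStepE PySem.Dict.empty)
              ((PySem.List.slice lookup (some 4) none).foldl pvStepX PySem.Dict.empty)).map pvLineB)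
        ++ ("    } " ++ PySem.Str.slice name (some 2) (some (-2)) ++ " ;\n\n") := by
  have h1 : (fun (pairs : PySem.Dict String (String × String)) rec =>
      if (PySem.List.pyGet? ((PySem.Str.split? rec "\t").getD []) 0).getD "" = "entry" then
        pairs.insert ((PySem.List.pyGet? ((PySem.Str.split? rec "\t").getD []) 1).getD "")
          ((if ((PySem.Str.split? rec "\t").getD []).length = 4 then
              ((PySem.List.pyGet? ((PySem.Str.split? rec "\t").getD []) 2).getD "") ++ " contourpoint " ++
                ((PySem.List.pyGet? ((PySem.Str.split? rec "\t").getD []) 3).getD "")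
            else (PySem.List.pyGet? ((PySem.Str.split? rec "\t").getD []) 2).getD ""), "NULL")
      else pairs) = pvStep1 := by
    funext pairs rec
    simp only [pvStep1, pvFields, pvKey, pvEntryV, pvExitV]
  have h2 : (fun (pairs : PySem.Dict String (String × String)) rec =>
      if (PySem.List.pyGet? ((PySem.Str.split? rec "\t").getD []) 0).getD "" ≠ "entry" then
        match pairs.get? ((PySem.List.pyGet? ((PySem.Str.split? rec "\t").getD []) 1).getD "") with
        | some pr => pairs.insert ((PySem.List.pyGet? ((PySem.Str.split? rec "\t").getD []) 1).getD "")
            (pr.1, (PySem.List.pyGet? ((PySem.Str.split? rec "\t").getD []) 2).getD "")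
        | none => pairs.insert ((PySem.List.pyGet? ((PySem.Str.split? rec "\t").getD []) 1).getD "")
            ("NULL", (PySem.List.pyGet? ((PySem.Str.split? rec "\t").getD []) 2).getD "")
      else pairs) = pvStep2 := by
    funext pairs rec
    simp only [pvStep2, pvFields, pvKey, pvExitV]
  have hE := pv_nodup_foldE (PySem.List.slice lookup (some 4) none) PySem.Dict.empty PySem.Dict.nodup_keys_empty
  have hbase : ((PySem.List.slice lookup (some 4) none).foldl pvStep1 PySem.Dict.empty).items
      = pvF ((PySem.List.slice lookup (some 4) none).foldl pvStepE PySem.Dict.empty) PySem.Dict.empty := by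
    rw [pv_pass1 (PySem.List.slice lookup (some 4) none) PySem.Dict.empty PySem.Dict.empty rfl]
    simp only [pvF, X_filter, PySem.Dict.getD_empty,
      show (PySem.Dict.empty : PySem.Dict String String).items = [] from rfl,
      List.filter_nil, List.map_nil, List.append_nil]
  have hitems : ((PySem.List.slice lookup (some 4) none).foldl pvStep2
        ((PySem.List.slice lookup (some 4) none).foldl pvStep1 PySem.Dict.empty)).items
      = pvF ((PySem.List.slice lookup (some 4) none).foldl pvStepE PySem.Dict.empty)
          ((PySem.List.slice lookup (some 4) none).foldl pvStepX PySem.Dict.empty) :=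
    pv_pass2 _ hE _ _ PySem.Dict.nodup_keys_empty _ hbase
  simp only [parseCursive_alt]
  rw [h1, h2, hitems, pv_foldl_lines, pv_join_empty, pv_flag_eq]
  simp only [List.cons_append, List.nil_append]
  rw [pv_strcat_cons, pv_strcat_cons, pv_strcat_append, pv_strcat_cons]
  simp [pvStrcat, String.append_assoc]
  congr 1
  apply List.map_congr_left
  intro kv _
  simp [pvLineB, String.append_assoc]

-- the emitted line lists agree
lemma pv_lines_eq (E X : PySem.Dict String String) :
    pvStrcat ((pvF E X).map pvLineB) =
      pvStrcat (E.items.map (pvLineA X)) ++ pvStrcat ((X.items.filter (fun p => !E.contains p.1)).map pvLineX) := by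
  rw [pvF, List.map_append, pv_strcat_append, List.map_map, List.map_map]
  congr 1
  · apply congrArg
    apply List.map_congr_left
    intro p _
    by_cases hc : X.contains p.1 = true
    · have hsome : (X.get? p.1).isSome := by
        rw [← PySem.Dict.contains_eq_isSome_get?]; exact hc
      obtain ⟨w, hw⟩ := Option.isSome_iff_exists.mp hsome
      simp only [Function.comp, pvLineA, pvLineB, hc, if_pos,
        PySem.Dict.getD_eq_get?_getD, hw, Option.getD_some]
      rw [String.append_assoc (s₂ := ">") (s₃ := " <anchor "),
        show (">" : String) ++ " <anchor " = "> <anchor " from by decide]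
    · have hc' : X.contains p.1 = false := by simpa using hc
      simp only [Function.comp, pvLineA, pvLineB, hc', Bool.false_eq_true, if_false,
        PySem.Dict.getD_of_not_contains _ _ hc',
        show PySem.Str.replace "NULL" "," " " = "NULL" from by decide]
      rw [String.append_assoc (s₂ := ">") (s₃ := " <anchor "),
        show (">" : String) ++ " <anchor " = "> <anchor " from by decide]
  · apply congrArg
    simp only [X_filter]
    apply List.map_congr_left
    intro p _
    simp only [Function.comp, pvLineB, pvLineX,
      show PySem.Str.replace "NULL" "," " " = "NULL" from by decide]
    rw [String.append_assoc (s₂ := "NULL") (s₃ := "> <anchor "),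
      show ("NULL" : String) ++ "> <anchor " = "NULL> <anchor " from by decide,
      String.append_assoc (s₂ := " <anchor ") (s₃ := "NULL> <anchor "),
      show (" <anchor " : String) ++ "NULL> <anchor " = " <anchor NULL> <anchor " from by decide,
      String.append_assoc (s₂ := " <anchor NULL>") (s₃ := " <anchor "),
      show (" <anchor NULL>" : String) ++ " <anchor " = " <anchor NULL> <anchor " from by decide]

-- ===== VERDICT (by name: the statement is the Claim_ definition above) =====
theorem parseCursive_spec : Claim_equal_parseCursive := by
  intro name lookup _ _
  unfold Spec_parseCursive
  rw [pv_A_char, pv_B_char, pv_lines_eq]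
  simp [String.append_assoc]
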